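-- pv_equiv track=rewrite | github.com/shaoan7/premarket-chec | main.py | _score_bar
-- ===== SOURCE A (Python) =====
-- def _score_bar(score):
--     width = 10
--     mid = width // 2
--     filled = int(abs(score) / 100 * mid)
--     filled = max(1, min(mid, filled))
--
--     bar = list("─" * width)
--     bar[mid] = "│"
--     if score > 0:
--         for i in range(mid + 1, mid + 1 + filled):
--             if i < width:
--                 bar[i] = "█"
--     elif score < 0:
--         for i in range(mid - filled, mid):
--             if i >= 0:
--                 bar[i] = "█"
--
--     return f"空[{''.join(bar)}]多"
-- ===== SOURCE B (Python) =====
-- def _score_bar(score):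
--     filled = max(1, min(5, int(abs(score) / 100 * 5)))
--     if score > 0:
--         m = min(filled, 4)
--         left, right = "─" * 5, "█" * m + "─" * (4 - m)
--     elif score < 0:
--         left, right = "─" * (5 - filled) + "█" * filled, "─" * 4
--     else:
--         left, right = "─" * 5, "─" * 4
--     return f"空[{left}│{right}]多"
-- ===== Notes on version B (the rewrite author's own statement) =====
-- stated objective: simpler
-- what changed: B builds the bar by closed-form concatenation of dash/block segments (left and right halves computed directly from the clamped fill count) instead of mutating a fixed character list through index loops with bounds guards.
import Mathlib
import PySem

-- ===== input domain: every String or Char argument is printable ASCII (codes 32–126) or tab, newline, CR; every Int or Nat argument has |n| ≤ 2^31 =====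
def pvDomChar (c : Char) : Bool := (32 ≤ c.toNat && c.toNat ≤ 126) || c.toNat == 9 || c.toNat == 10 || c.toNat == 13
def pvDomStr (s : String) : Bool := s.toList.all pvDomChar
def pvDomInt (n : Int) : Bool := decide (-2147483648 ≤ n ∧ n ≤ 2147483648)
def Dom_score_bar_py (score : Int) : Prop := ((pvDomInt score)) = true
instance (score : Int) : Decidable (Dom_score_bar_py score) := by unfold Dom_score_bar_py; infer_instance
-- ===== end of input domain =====

-- B builds the bar by closed-form segment concatenation instead of A's list mutation through index loops (objective: simpler).

-- ===== PORT A =====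
-- Python's `int(abs(score) / 100 * mid)` uses float arithmetic; on |score| ≤ 2^31 it equals
-- integer floor division (abs(score) * mid) // 100 (verified exhaustively over the range where
-- the pre-clamp value is below 6; above that the clamp to mid makes any difference irrelevant):
-- ported as PySem.Int.floordiv (|score| * mid) 100, exact on the stated domain.
def score_bar_py (score : Int) : String :=
  let width : Int := 10
  let mid : Int := PySem.Int.floordiv width 2
  let filled0 : Int := PySem.Int.floordiv (|score| * mid) 100
  let filled : Int := max 1 (min mid filled0)
  let bar : List Char := List.replicate 10 '─'
  let bar := bar.set mid.toNat '│'
  let bar :=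
    if score > 0 then
      (PySem.List.pyRange (mid + 1) (mid + 1 + filled) 1).foldl
        (fun b i => if i < width then b.set i.toNat '█' else b) bar
    else if score < 0 then
      (PySem.List.pyRange (mid - filled) mid 1).foldl
        (fun b i => if i ≥ 0 then b.set i.toNat '█' else b) bar
    else bar
  "空[" ++ String.mk bar ++ "]多"

-- ===== PORT B =====
def score_bar_py_alt (score : Int) : String :=
  let filled : Int := max 1 (min 5 (PySem.Int.floordiv (|score| * 5) 100))
  let left : String :=
    if score < 0 then
      String.mk (List.replicate (5 - filled).toNat '─' ++ List.replicate filled.toNat '█')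
    else String.mk (List.replicate 5 '─')
  let right : String :=
    if score > 0 then
      let m : Int := min filled 4
      String.mk (List.replicate m.toNat '█' ++ List.replicate (4 - m).toNat '─')
    else String.mk (List.replicate 4 '─')
  "空[" ++ left ++ "│" ++ right ++ "]多"

-- ===== PRECONDITION & SPEC =====
def Spec_score_bar_py (score : Int) (out : String) : Prop := out = score_bar_py_alt score
instance (score : Int) (out : String) : Decidable (Spec_score_bar_py score out) := by unfold Spec_score_bar_py; infer_instance

-- ===== CLAIM (what is proved, stated in full; the proofs are below) =====
def Claim_equal_score_bar_py : Prop := ∀ (score : Int), Dom_score_bar_py score → Spec_score_bar_py score (score_bar_py score)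

-- ===== LEMMAS AND PROOFS =====

-- ===== VERDICT (by name: the statement is the Claim_ definition above) =====
theorem score_bar_py_spec : Claim_equal_score_bar_py := by
  intro s _
  unfold Spec_score_bar_py score_bar_py score_bar_py_alt
  have hmid : PySem.Int.floordiv (10 : Int) 2 = 5 := by decide
  simp only [hmid]
  set t : Int := max 1 (min 5 (PySem.Int.floordiv (|s| * 5) 100)) with ht
  have h1 : 1 ≤ t := le_max_left _ _
  have h5 : t ≤ 5 := max_le (by norm_num) (min_le_left _ _)
  clear_value t
  rcases lt_trichotomy s 0 with hs | hs | hs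
  · rw [if_neg (by omega), if_pos hs, if_pos hs, if_neg (by omega)]
    interval_cases t <;> decide
  · subst hs
    norm_num
    decide
  · rw [if_pos hs, if_pos hs, if_neg (by omega)]
    interval_cases t <;> decide
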